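-- pv_equiv track=rewrite | github.com/Zearus/PythonFreeCodeCampProjects | Time Calculator/time_calculator.py | taketime
-- ===== SOURCE A (Python) =====
-- def taketime(time):
--     timelist = []
--     timestr = str()
--     for i in time:
--         if i != ":" and i != " ":
--             timestr = timestr + i
--         else:
--             timelist = timelist + [timestr]
--             timestr = str()
--     timelist = timelist + [timestr]
--     return timelist
-- ===== SOURCE B (Python) =====
-- def taketime(time):
--     return time.replace(":", " ").split(" ")
-- ===== Notes on version B (the rewrite author's own statement) =====
-- stated objective: idiomatic
-- what changed: Replaced the character-by-character accumulator loop with normalizing the colon delimiter to a space via str.replace and one explicit-separator str.split call.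
import Mathlib
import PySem

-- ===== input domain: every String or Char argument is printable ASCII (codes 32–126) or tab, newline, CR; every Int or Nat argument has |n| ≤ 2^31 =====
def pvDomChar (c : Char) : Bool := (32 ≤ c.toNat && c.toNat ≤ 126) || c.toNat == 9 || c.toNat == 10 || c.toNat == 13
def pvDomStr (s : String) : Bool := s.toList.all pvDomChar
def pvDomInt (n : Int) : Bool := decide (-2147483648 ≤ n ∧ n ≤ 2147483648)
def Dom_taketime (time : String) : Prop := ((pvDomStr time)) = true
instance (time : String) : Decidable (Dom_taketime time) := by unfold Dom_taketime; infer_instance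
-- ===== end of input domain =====

-- B replaces A's character-accumulator loop by normalizing ':' to ' ' with str.replace and one split(' ') call (idiomatic decomposition).

-- ===== PORT A =====
-- literal port of A's loop: state (timelist, timestr), one step per character
def taketime (time : String) : List String :=
  let st := time.toList.foldl
    (fun (st : List String × String) i =>
      if i ≠ ':' ∧ i ≠ ' ' then (st.1, st.2.push i)
      else (st.1 ++ [st.2], ""))
    ([], "")
  st.1 ++ [st.2]

-- ===== PORT B =====
-- literal port of Source B: time.replace(":", " ").split(" ")
def taketime_alt (time : String) : List String :=
  (PySem.Str.split? (PySem.Str.replace time ":" " ") " ").getD []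

-- ===== PRECONDITION & SPEC =====
def Spec_taketime (time : String) (out : List String) : Prop := out = taketime_alt time
instance (time : String) (out : List String) : Decidable (Spec_taketime time out) := by unfold Spec_taketime; infer_instance

-- ===== CLAIM (what is proved, stated in full; the proofs are below) =====
def Claim_equal_taketime : Prop := ∀ (time : String), Dom_taketime time → Spec_taketime time (taketime time)

-- ===== LEMMAS AND PROOFS =====
set_option maxRecDepth 4000

-- the character substitution performed by replace(":", " ")
def pvSub (c : Char) : Char := if c = ':' then ' ' else c

-- tokenization on spaces with an explicit current-token accumulator
def pvTok : List Char → List Char → List (List Char)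
  | [], cur => [cur]
  | c :: t, cur => if c = ' ' then cur :: pvTok t [] else pvTok t (cur ++ [c])

theorem pvReplaceGo_succ (f : Nat) (c : Char) (t acc : List Char) :
    PySem.Chars.replace.go [':'] [' '] (f+1) (c::t) acc =
    (if c = ':' then PySem.Chars.replace.go [':'] [' '] f t (' '::acc)
     else PySem.Chars.replace.go [':'] [' '] f t (c::acc)) := by
  rw [PySem.Chars.replace.go.eq_def]
  by_cases h : c = ':' <;> simp [List.isPrefixOf, h]
  exact fun h' => absurd h'.symm h

theorem pvSplitGo_succ (f : Nat) (c : Char) (t cur : List Char) (acc : List (List Char)) :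
    PySem.Chars.splitOn.go [' '] (f+1) (c::t) cur acc =
    (if c = ' ' then PySem.Chars.splitOn.go [' '] f t [] (cur.reverse::acc)
     else PySem.Chars.splitOn.go [' '] f t (c::cur) acc) := by
  rw [PySem.Chars.splitOn.go.eq_def]
  by_cases h : c = ' ' <;> simp [List.isPrefixOf, h]
  exact fun h' => absurd h'.symm h

theorem pvReplace_go (l : List Char) : ∀ (fuel : Nat) (acc : List Char), l.length ≤ fuel →
    PySem.Chars.replace.go [':'] [' '] fuel l acc = acc.reverse ++ l.map pvSub := by
  induction l with
  | nil =>
    intro fuel acc _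
    cases fuel <;> simp [PySem.Chars.replace.go]
  | cons c t ih =>
    intro fuel acc h
    cases fuel with
    | zero => simp at h
    | succ f =>
      rw [pvReplaceGo_succ]
      have ht : t.length ≤ f := by simpa using h
      by_cases hc : c = ':' <;> simp [hc, ih f _ ht, pvSub]

theorem pvReplace_eq (l : List Char) :
    PySem.Chars.replace l [':'] [' '] = l.map pvSub := by
  have h := pvReplace_go l l.length [] (le_refl _)
  simpa [PySem.Chars.replace] using h

theorem pvSplitOn_go (l : List Char) : ∀ (fuel : Nat) (cur : List Char) (acc : List (List Char)),
    l.length < fuel →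
    PySem.Chars.splitOn.go [' '] fuel l cur acc = acc.reverse ++ pvTok l cur.reverse := by
  induction l with
  | nil =>
    intro fuel cur acc h
    cases fuel with
    | zero => simp at h
    | succ f => rw [PySem.Chars.splitOn.go.eq_def]; simp [pvTok]
  | cons c t ih =>
    intro fuel cur acc h
    cases fuel with
    | zero => simp at h
    | succ f =>
      rw [pvSplitGo_succ]
      have ht : t.length < f := by simpa using h
      by_cases hc : c = ' '
      · simp [hc, ih f [] (cur.reverse::acc) ht, pvTok]
      · have : (c :: cur).reverse = cur.reverse ++ [c] := by simp
        simp [hc, ih f (c::cur) acc ht, pvTok, this]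

theorem pvSplitOn_eq (l : List Char) :
    PySem.Chars.splitOn l [' '] = pvTok l [] := by
  rw [PySem.Chars.splitOn]
  simpa using pvSplitOn_go l (l.length + 1) [] [] (by omega)

theorem pvFoldA (l : List Char) : ∀ (acc : List String) (cur : String),
    (let st := l.foldl (fun (st : List String × String) i =>
        if i ≠ ':' ∧ i ≠ ' ' then (st.1, st.2.push i) else (st.1 ++ [st.2], "")) (acc, cur)
     st.1 ++ [st.2])
    = acc ++ (pvTok (l.map pvSub) cur.toList).map String.ofList := by
  induction l with
  | nil => intro acc cur; simp [pvTok]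
  | cons c t ih =>
    intro acc cur
    by_cases hc : c ≠ ':' ∧ c ≠ ' '
    · have hs : pvSub c = c := by simp [pvSub, hc.1]
      have hns : ¬ pvSub c = ' ' := by rw [hs]; exact hc.2
      simp only [List.foldl_cons, List.map_cons, if_pos hc]
      rw [ih acc (cur.push c)]
      simp [pvTok, hs, hc.2]
    · have hs : pvSub c = ' ' := by
        simp [pvSub]; rcases not_and_or.mp hc with h | h <;> simp_all
      simp only [List.foldl_cons, List.map_cons, if_neg hc]
      rw [ih (acc ++ [cur]) ""]
      simp [pvTok, hs]

-- ===== VERDICT (by name: the statement is the Claim_ definition above) =====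
theorem taketime_spec : Claim_equal_taketime := by
  intro time _
  unfold Spec_taketime
  have hA : taketime time = List.map String.ofList (pvTok (time.toList.map pvSub) []) := by
    have h := pvFoldA time.toList [] ""
    simpa [taketime] using h
  have hrep : (PySem.Str.replace time ":" " ").toList = time.toList.map pvSub := by
    rw [PySem.Str.toList_replace]
    rw [show (":" : String).toList = [':'] from by decide,
        show (" " : String).toList = [' '] from by decide, pvReplace_eq]
  have hsplit := PySem.Str.split?_map (PySem.Str.replace time ":" " ") " "
  rw [show (" " : String).toList = [' '] from by decide, hrep] at hsplit
  simp only [PySem.Chars.split?, List.isEmpty_cons, Bool.false_eq_true, if_false, pvSplitOn_eq] at hsplit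
  cases hps : PySem.Str.split? (PySem.Str.replace time ":" " ") " " with
  | none => rw [hps] at hsplit; simp at hsplit
  | some parts =>
    rw [hps] at hsplit
    simp only [Option.map_some, Option.some.injEq] at hsplit
    have hparts : parts = List.map String.ofList (pvTok (time.toList.map pvSub) []) := by
      rw [← hsplit, List.map_map]
      simp [Function.comp_def]
    rw [hA]
    unfold taketime_alt
    rw [hps, Option.getD_some, hparts]
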